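-- pv_equiv track=rewrite | github.com/jerte/ProjectEuler | PE4/PE4.py | isThreeDigProduct
-- ===== SOURCE A (Python) =====
-- def isThreeDigProduct(n):
-- 	i = 999
-- 	while( i > 100 ):
-- 		if n % i == 0:
-- 			j = int(n / i / 100)
-- 			if j < 10 and j > 0:
-- 				return True
-- 		i -= 1
-- 	return False
-- ===== SOURCE B (Python) =====
-- import math
--
-- def isThreeDigProduct(n):
--     # trial division by the smaller factor up to isqrt(n)
--     if n < 10000 or n > 998001:
--         return False
--     for a in range(100, math.isqrt(n) + 1):
--         if n % a == 0 and n // a <= 999: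
--             return True
--     return False
-- ===== Notes on version B (the rewrite author's own statement) =====
-- stated objective: alternative
-- what changed: Replaces the fixed downward scan over all candidate factors 999..101 by a range guard plus trial division by the smaller factor only up to isqrt(n).
-- intended difference: On n = 10000 (= 100*100, the only product of two three-digit numbers that A misses) A returns False because its loop condition 'i > 100' skips the factor 100, while B returns True, which is the intended answer for 'product of two three-digit numbers'. — e.g. on isThreeDigProduct(10000): A returns false, B returns true
import Mathlib
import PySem

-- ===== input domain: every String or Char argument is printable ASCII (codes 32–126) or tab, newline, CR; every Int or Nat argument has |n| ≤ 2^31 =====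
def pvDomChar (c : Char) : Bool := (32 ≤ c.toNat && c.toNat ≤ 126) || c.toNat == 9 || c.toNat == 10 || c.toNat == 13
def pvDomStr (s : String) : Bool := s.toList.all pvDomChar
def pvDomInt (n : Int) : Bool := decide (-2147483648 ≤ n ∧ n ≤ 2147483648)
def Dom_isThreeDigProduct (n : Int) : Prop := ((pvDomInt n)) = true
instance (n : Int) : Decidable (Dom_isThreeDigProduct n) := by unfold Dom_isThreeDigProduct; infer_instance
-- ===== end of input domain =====

-- B replaces A's fixed downward scan over 999..101 by a range guard and trial division
-- by the smaller factor up to isqrt(n); B additionally returns the intended True at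
-- n = 10000 = 100*100, which A's 'i > 100' loop condition misses (see D_ below).

-- ===== PORT A =====
-- while i > 100, i from 999 downward: fuel m+1 corresponds to i = 101 + m
def pvAWhile (n : Int) : Nat → Bool
  | 0 => false
  | m + 1 =>
      let i : Int := 101 + (m : Int)
      if PySem.Int.mod n i = 0 then
        -- j = int(n / i / 100): since i divides n, n / i is the exact integer quotient q
        -- and (for |n| ≤ 2^31) int(q / 100) is exactly truncation toward zero, q.tdiv 100
        let j : Int := (n.tdiv i).tdiv 100
        if j < 10 ∧ 0 < j then true else pvAWhile n m
      else pvAWhile n m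

def isThreeDigProduct (n : Int) : Bool := pvAWhile n 899

-- ===== PORT B =====
def isThreeDigProduct_alt (n : Int) : Bool :=
  if n < 10000 ∨ 998001 < n then false
  else
    (PySem.List.pyRange 100 ((Nat.sqrt n.toNat : Int) + 1) 1).any fun a =>
      decide (PySem.Int.mod n a = 0) && decide (PySem.Int.floordiv n a ≤ 999)

-- ===== PRECONDITION & SPEC =====
-- On n = 10000 (= 100*100) A returns False because its loop condition 'i > 100' skips the
-- factor 100, while B returns True, the intended answer for 'product of two three-digit numbers'.
def D_isThreeDigProduct (n : Int) : Prop := n = 10000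
instance (n : Int) : Decidable (D_isThreeDigProduct n) := by unfold D_isThreeDigProduct; infer_instance

def Spec_isThreeDigProduct (n : Int) (out : Bool) : Prop := ¬ D_isThreeDigProduct n → out = isThreeDigProduct_alt n
instance (n : Int) (out : Bool) : Decidable (Spec_isThreeDigProduct n out) := by unfold Spec_isThreeDigProduct; infer_instance

def pvDiffWitness_isThreeDigProduct : Int := 10000
def pvDiffWitnessOut_isThreeDigProduct : Bool × Bool := (false, true)

-- ===== CLAIM (what is proved, stated in full; the proofs are below) =====
def Claim_unchanged_isThreeDigProduct : Prop := ∀ (n : Int), Dom_isThreeDigProduct n → Spec_isThreeDigProduct n (isThreeDigProduct n)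
def Claim_changed_isThreeDigProduct : Prop := Dom_isThreeDigProduct (pvDiffWitness_isThreeDigProduct) ∧ D_isThreeDigProduct (pvDiffWitness_isThreeDigProduct) ∧ isThreeDigProduct (pvDiffWitness_isThreeDigProduct) = pvDiffWitnessOut_isThreeDigProduct.1 ∧ isThreeDigProduct_alt (pvDiffWitness_isThreeDigProduct) = pvDiffWitnessOut_isThreeDigProduct.2 ∧ pvDiffWitnessOut_isThreeDigProduct.1 ≠ pvDiffWitnessOut_isThreeDigProduct.2
def Claim_exact_isThreeDigProduct : Prop := ∀ (n : Int), Dom_isThreeDigProduct n → D_isThreeDigProduct n → isThreeDigProduct n ≠ isThreeDigProduct_alt n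

-- ===== LEMMAS AND PROOFS =====

-- A accepts n iff n = a * b with 100 ≤ a ≤ 999 and 101 ≤ b ≤ 999
def pvP (n : Int) : Prop := ∃ a b : Int, 100 ≤ a ∧ a ≤ 999 ∧ 101 ≤ b ∧ b ≤ 999 ∧ n = a * b

-- B accepts n iff n = a * b with 100 ≤ a ≤ b ≤ 999
def pvQ (n : Int) : Prop := ∃ a b : Int, 100 ≤ a ∧ a ≤ b ∧ b ≤ 999 ∧ n = a * b

lemma pv_tdiv100_window (q : Int) : ((q.tdiv 100 < 10 ∧ 0 < q.tdiv 100) ↔ (100 ≤ q ∧ q ≤ 999)) := by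
  rcases le_or_gt 0 q with h | h
  · rw [Int.tdiv_eq_ediv_of_nonneg h]; omega
  · have h1 : q.tdiv 100 = -((-q).tdiv 100) := by
      rw [← Int.neg_tdiv, neg_neg]
    have h2 : 0 ≤ (-q).tdiv 100 := Int.tdiv_nonneg (by omega) (by norm_num)
    constructor
    · rintro ⟨_, hpos⟩; omega
    · rintro ⟨hle, _⟩; omega

lemma pv_while_iff (n : Int) : ∀ k : Nat, (pvAWhile n k = true ↔
    ∃ m : Nat, m < k ∧ PySem.Int.mod n (101 + (m : Int)) = 0 ∧
      ((n.tdiv (101 + (m : Int))).tdiv 100 < 10 ∧ 0 < (n.tdiv (101 + (m : Int))).tdiv 100)) := by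
  intro k
  induction k with
  | zero => simp [pvAWhile]
  | succ m ih =>
      simp only [pvAWhile]
      split_ifs with hmod hj
      · constructor
        · intro _
          exact ⟨m, Nat.lt_succ_self m, hmod, hj⟩
        · intro _; rfl
      · rw [ih]
        constructor
        · rintro ⟨m', hm', h1, h2⟩; exact ⟨m', Nat.lt_succ_of_lt hm', h1, h2⟩
        · rintro ⟨m', hm', h1, h2⟩
          rcases Nat.lt_succ_iff_lt_or_eq.mp hm' with h | h
          · exact ⟨m', h, h1, h2⟩
          · subst h; exact absurd h2 hj
      · rw [ih]
        constructor
        · rintro ⟨m', hm', h1, h2⟩; exact ⟨m', Nat.lt_succ_of_lt hm', h1, h2⟩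
        · rintro ⟨m', hm', h1, h2⟩
          rcases Nat.lt_succ_iff_lt_or_eq.mp hm' with h | h
          · exact ⟨m', h, h1, h2⟩
          · subst h; exact absurd h1 hmod

lemma pvA_iff (n : Int) : isThreeDigProduct n = true ↔ pvP n := by
  rw [isThreeDigProduct, pv_while_iff]
  constructor
  · rintro ⟨m, hm, hmod, hwin⟩
    set i : Int := 101 + (m : Int) with hi
    have hipos : 0 < i := by positivity
    have hdvd : i ∣ n := (PySem.Int.mod_eq_zero_iff_dvd n i).mp hmod
    have hq := (pv_tdiv100_window (n.tdiv i)).mp hwin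
    refine ⟨n.tdiv i, i, hq.1, hq.2, by omega, by omega, ?_⟩
    rw [Int.tdiv_eq_ediv_of_dvd hdvd]
    exact (Int.ediv_mul_cancel hdvd).symm
  · rintro ⟨a, b, ha1, ha2, hb1, hb2, hn⟩
    refine ⟨(b - 101).toNat, by omega, ?_, ?_⟩
    · have hb : 101 + ((b - 101).toNat : Int) = b := by omega
      rw [hb]
      exact (PySem.Int.mod_eq_zero_iff_dvd n b).mpr ⟨a, by rw [hn, mul_comm]⟩
    · have hb : 101 + ((b - 101).toNat : Int) = b := by omega
      rw [hb]
      have hq : n.tdiv b = a := by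
        have hdv : b ∣ n := ⟨a, by rw [hn, mul_comm]⟩
        rw [Int.tdiv_eq_ediv_of_dvd hdv, hn, mul_comm, Int.mul_ediv_cancel_left _ (by omega : b ≠ 0)]
      rw [hq]
      exact (pv_tdiv100_window a).mpr ⟨ha1, ha2⟩

lemma pvB_iff (n : Int) : isThreeDigProduct_alt n = true ↔ pvQ n := by
  rw [isThreeDigProduct_alt]
  split_ifs with hrange
  · simp only [false_iff]
    rintro ⟨a, b, ha1, hab, hb2, hn⟩
    have h1 : 10000 ≤ n := by nlinarith
    have h2 : n ≤ 998001 := by nlinarith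
    omega
  · push Not at hrange
    obtain ⟨hlo, hhi⟩ := hrange
    have hnt : (n.toNat : Int) = n := by omega
    rw [List.any_eq_true]
    constructor
    · rintro ⟨a, hmem, hcond⟩
      rw [PySem.List.mem_pyRange_one] at hmem
      obtain ⟨ha1, ha2⟩ := hmem
      simp only [Bool.and_eq_true, decide_eq_true_eq] at hcond
      obtain ⟨hmod, hflo⟩ := hcond
      have hapos : 0 < a := by omega
      have hdvd : a ∣ n := (PySem.Int.mod_eq_zero_iff_dvd n a).mp hmod
      have hfd : PySem.Int.floordiv n a = n / a := PySem.Int.floordiv_eq_ediv_of_pos hapos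
      refine ⟨a, n / a, ha1, ?_, by omega, ?_⟩
      · -- a ≤ sqrt(n) gives a * a ≤ n, hence a ≤ n / a
        have hsq : a ≤ (Nat.sqrt n.toNat : Int) := by omega
        have haa : a.toNat * a.toNat ≤ n.toNat := by
          calc a.toNat * a.toNat ≤ Nat.sqrt n.toNat * Nat.sqrt n.toNat := by
                have : a.toNat ≤ Nat.sqrt n.toNat := by omega
                exact Nat.mul_le_mul this this
            _ ≤ n.toNat := Nat.sqrt_le n.toNat
        have haa' : a * a ≤ n := by
          have h' : ((a.toNat * a.toNat : Nat) : Int) ≤ ((n.toNat : Nat) : Int) := by exact_mod_cast haa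
          push_cast at h'
          rw [Int.toNat_of_nonneg (by omega : (0:Int) ≤ a), Int.toNat_of_nonneg (by omega : (0:Int) ≤ n)] at h'
          exact h'
        have : a * a ≤ a * (n / a) := by
          rw [Int.mul_ediv_cancel' hdvd]; exact haa'
        exact le_of_mul_le_mul_left this hapos
      · rw [Int.mul_ediv_cancel' hdvd]
    · rintro ⟨a, b, ha1, hab, hb2, hn⟩
      have hapos : 0 < a := by omega
      have hdvd : a ∣ n := ⟨b, hn⟩
      refine ⟨a, ?_, ?_⟩
      · rw [PySem.List.mem_pyRange_one]
        refine ⟨ha1, ?_⟩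
        have hle : a.toNat ≤ Nat.sqrt n.toNat := by
          rw [Nat.le_sqrt]
          have haa : a * a ≤ n := by nlinarith
          zify
          rw [Int.toNat_of_nonneg (by omega : (0:Int) ≤ a), Int.toNat_of_nonneg (by omega : (0:Int) ≤ n)]
          exact haa
        omega
      · have hb : n / a = b := by rw [hn, mul_comm, Int.mul_ediv_cancel _ (by omega)]
        simp only [Bool.and_eq_true, decide_eq_true_eq]
        refine ⟨(PySem.Int.mod_eq_zero_iff_dvd n a).mpr hdvd, ?_⟩
        rw [PySem.Int.floordiv_eq_ediv_of_pos hapos, hb]; omega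

lemma pvPQ (n : Int) (hne : n ≠ 10000) : pvP n ↔ pvQ n := by
  constructor
  · rintro ⟨a, b, ha1, ha2, hb1, hb2, hn⟩
    rcases le_or_gt a b with h | h
    · exact ⟨a, b, ha1, h, hb2, hn⟩
    · exact ⟨b, a, by omega, by omega, by omega, by rw [hn, mul_comm]⟩
  · rintro ⟨a, b, ha1, hab, hb2, hn⟩
    rcases le_or_gt 101 b with h | h
    · exact ⟨a, b, ha1, by omega, h, hb2, hn⟩
    · exfalso
      have : a = 100 ∧ b = 100 := by omega
      apply hne; rw [hn, this.1, this.2]; norm_num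

-- ===== VERDICT (by name: the statement is the Claim_ definition above) =====
theorem isThreeDigProduct_spec : Claim_unchanged_isThreeDigProduct := by
  intro n _ hD
  have hne : n ≠ 10000 := hD
  cases hA : isThreeDigProduct n <;> cases hB : isThreeDigProduct_alt n <;> try rfl
  · have hP := (pvPQ n hne).mpr ((pvB_iff n).mp hB)
    rw [← pvA_iff n] at hP
    simp [hA] at hP
  · have hQ := (pvPQ n hne).mp ((pvA_iff n).mp hA)
    rw [← pvB_iff n] at hQ
    simp [hB] at hQ

lemma pvA_10000 : isThreeDigProduct 10000 = false := by
  rw [← Bool.not_eq_true, pvA_iff]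
  rintro ⟨a, b, ha1, ha2, hb1, hb2, hn⟩
  nlinarith

lemma pvB_10000 : isThreeDigProduct_alt 10000 = true := by
  rw [pvB_iff]
  exact ⟨100, 100, by norm_num, le_refl _, by norm_num, by norm_num⟩

theorem isThreeDigProduct_changed : Claim_changed_isThreeDigProduct := by
  unfold Claim_changed_isThreeDigProduct
  exact ⟨by decide, rfl, pvA_10000, pvB_10000, by decide⟩

theorem isThreeDigProduct_tight : Claim_exact_isThreeDigProduct := by
  intro n _ hD
  unfold D_isThreeDigProduct at hD
  subst hD
  rw [pvA_10000, pvB_10000]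
  simp
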